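-- pv_equiv track=rewrite | github.com/fulvian/github-discovery | src/github_discovery/screening/ci_cd.py | _detect_ci_systems
-- ===== SOURCE A (Python) =====
-- _CI_CONFIG_PATHS: dict[str, list[str]] = {
--     "github_actions": [".github/workflows/"],
--     "travis": [".travis.yml"],
--     "circleci": [".circleci/config.yml"],
--     "gitlab_ci": [".gitlab-ci.yml"],
--     "jenkins": ["Jenkinsfile"],
-- }
--
-- def _detect_ci_systems(contents: list[str]) -> list[str]:
--     """Detect which CI systems are present in the repository."""
--     lower_contents = {c.lower() for c in contents}
--     detected: list[str] = []
--
--     for system, paths in _CI_CONFIG_PATHS.items():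
--         for pattern in paths:
--             # For directory-based patterns (ending with /), check prefix
--             if pattern.endswith("/"):
--                 if any(c.lower().startswith(pattern.lower()) for c in contents):
--                     detected.append(system)
--                     break
--             elif pattern.lower() in lower_contents:
--                 detected.append(system)
--                 break
--
--     return detected
-- ===== SOURCE B (Python) =====
-- _CI_SYSTEM_ORDER = ["github_actions", "travis", "circleci", "gitlab_ci", "jenkins"]
--
-- _EXACT_LOOKUP = {
--     ".travis.yml": "travis",
--     ".circleci/config.yml": "circleci",
--     ".gitlab-ci.yml": "gitlab_ci",
--     "jenkinsfile": "jenkins",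
-- }
--
-- def _detect_ci_systems(contents: list[str]) -> list[str]:
--     """Detect which CI systems are present in the repository (single pass)."""
--     found: set[str] = set()
--     for c in contents:
--         lc = c.lower()
--         if lc.startswith(".github/workflows/"):
--             found.add("github_actions")
--         sys = _EXACT_LOOKUP.get(lc)
--         if sys is not None:
--             found.add(sys)
--     return [s for s in _CI_SYSTEM_ORDER if s in found]
-- ===== Notes on version B (the rewrite author's own statement) =====
-- stated objective: alternative
-- what changed: Replaces the per-system nested scan over a lowercased set with one pass over the files: each file is lowercased once and dispatched via an exact-match lookup dict (plus the single prefix check) into a found set, then the systems are emitted in the fixed config order.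
import Mathlib
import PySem

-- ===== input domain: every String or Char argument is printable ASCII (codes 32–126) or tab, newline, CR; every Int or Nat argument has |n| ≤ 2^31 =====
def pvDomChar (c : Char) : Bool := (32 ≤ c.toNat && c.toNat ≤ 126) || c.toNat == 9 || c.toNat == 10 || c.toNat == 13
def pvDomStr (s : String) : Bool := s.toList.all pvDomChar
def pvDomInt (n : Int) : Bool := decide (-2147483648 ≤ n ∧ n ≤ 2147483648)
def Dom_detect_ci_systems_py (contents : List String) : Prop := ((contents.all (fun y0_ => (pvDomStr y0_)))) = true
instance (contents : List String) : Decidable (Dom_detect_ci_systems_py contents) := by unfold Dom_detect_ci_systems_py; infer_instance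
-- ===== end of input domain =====

set_option maxHeartbeats 1000000


-- B replaces A's per-system scans with one pass over the files through an exact-match
-- lookup dict plus the single prefix check, emitting systems in the fixed config order.

-- ===== PORT A =====
-- _CI_CONFIG_PATHS, in insertion order
def ciConfigPaths : List (String × List String) :=
  [("github_actions", [".github/workflows/"]),
   ("travis", [".travis.yml"]),
   ("circleci", [".circleci/config.yml"]),
   ("gitlab_ci", [".gitlab-ci.yml"]),
   ("jenkins", ["Jenkinsfile"])]

-- inner 'for pattern in paths' loop with break: true = some pattern matched
def ciInnerA (contents : List String) (lowerContents : PySem.Set String) : List String → Bool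
  | [] => false
  | pattern :: rest =>
    if PySem.Str.endswith pattern "/" then
      if contents.any (fun c => PySem.Str.startswith (PySem.Str.lower c) (PySem.Str.lower pattern)) then
        true
      else ciInnerA contents lowerContents rest
    else if PySem.Set.contains lowerContents (PySem.Str.lower pattern) then
      true
    else ciInnerA contents lowerContents rest

def detect_ci_systems_py (contents : List String) : List String :=
  let lowerContents : PySem.Set String := PySem.Set.ofList (contents.map PySem.Str.lower)
  ciConfigPaths.foldl
    (fun detected sp =>
      if ciInnerA contents lowerContents sp.2 then detected ++ [sp.1] else detected)
    []

-- ===== PORT B =====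
def ciSystemOrder : List String := ["github_actions", "travis", "circleci", "gitlab_ci", "jenkins"]

def ciExactLookup : PySem.Dict String String :=
  PySem.Dict.ofList
  [(".travis.yml", "travis"),
   (".circleci/config.yml", "circleci"),
   (".gitlab-ci.yml", "gitlab_ci"),
   ("jenkinsfile", "jenkins")]

def ciStepB (found : PySem.Set String) (c : String) : PySem.Set String :=
  let lc := PySem.Str.lower c
  let found := if PySem.Str.startswith lc ".github/workflows/" then PySem.Set.add found "github_actions" else found
  match PySem.Dict.get? ciExactLookup lc with
  | some sys => PySem.Set.add found sys
  | none => found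

def detect_ci_systems_py_alt (contents : List String) : List String :=
  let found : PySem.Set String := contents.foldl ciStepB PySem.Set.empty
  ciSystemOrder.filter (fun s => PySem.Set.contains found s)

-- ===== PRECONDITION & SPEC =====
def Spec_detect_ci_systems_py (contents : List String) (out : List String) : Prop := out = detect_ci_systems_py_alt contents
instance (contents : List String) (out : List String) : Decidable (Spec_detect_ci_systems_py contents out) := by unfold Spec_detect_ci_systems_py; infer_instance

-- ===== CLAIM (what is proved, stated in full; the proofs are below) =====
def Claim_equal_detect_ci_systems_py : Prop := ∀ (contents : List String), Dom_detect_ci_systems_py contents → Spec_detect_ci_systems_py contents (detect_ci_systems_py contents)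

-- ===== LEMMAS AND PROOFS =====

def condEq (contents : List String) (p : String) : Bool :=
  contents.any (fun c => PySem.Str.lower c == p)

lemma bool_ext {a b : Bool} (h : a = true ↔ b = true) : a = b := by
  cases a <;> cases b <;> simp_all

lemma contains_ofList_map (xs : List String) (p : String) :
    PySem.Set.contains (PySem.Set.ofList (xs.map PySem.Str.lower)) p = condEq xs p := by
  apply bool_ext
  rw [PySem.Set.contains_iff, PySem.Set.mem_ofList, List.mem_map]
  simp only [condEq, List.any_eq_true, beq_iff_eq]
lemma lookup_char (lc : String) :
    PySem.Dict.get? ciExactLookup lc =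
      if ".travis.yml" == lc then some "travis"
      else if ".circleci/config.yml" == lc then some "circleci"
      else if ".gitlab-ci.yml" == lc then some "gitlab_ci"
      else if "jenkinsfile" == lc then some "jenkins" else none := by
  have h : ciExactLookup = PySem.Dict.mk
      [(".travis.yml", "travis"), (".circleci/config.yml", "circleci"),
       (".gitlab-ci.yml", "gitlab_ci"), ("jenkinsfile", "jenkins")] := by decide
  rw [h]
  cases h1 : (".travis.yml" == lc) <;>
    cases h2 : (".circleci/config.yml" == lc) <;>
      cases h3 : (".gitlab-ci.yml" == lc) <;>
        cases h4 : ("jenkinsfile" == lc) <;>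
          simp [PySem.Dict.get?, List.find?, h1, h2, h3, h4]


lemma contains_add (s : PySem.Set String) (y x : String) :
    PySem.Set.contains (PySem.Set.add s y) x = (PySem.Set.contains s x || x == y) := by
  apply bool_ext
  rw [Bool.or_eq_true, PySem.Set.contains_iff, PySem.Set.contains_iff, PySem.Set.mem_add, beq_iff_eq]

lemma look_gha (lc : String) :
    (PySem.Dict.get? ciExactLookup lc == some "github_actions") = false := by
  rw [lookup_char]; split_ifs <;> decide

lemma look_t (lc : String) :
    (PySem.Dict.get? ciExactLookup lc == some "travis") = (lc == ".travis.yml") := by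
  rw [lookup_char]
  by_cases h : lc = ".travis.yml"
  · subst h; decide
  · have h1 : (lc == ".travis.yml") = false := by simp [h]
    have h2 : (".travis.yml" == lc) = false := by simp; exact fun e => h e.symm
    rw [h1, h2]
    simp only [Bool.false_eq_true, if_false]
    split_ifs <;> decide

lemma look_c (lc : String) :
    (PySem.Dict.get? ciExactLookup lc == some "circleci") = (lc == ".circleci/config.yml") := by
  rw [lookup_char]
  by_cases h : lc = ".circleci/config.yml"
  · subst h; decide
  · have h1 : (lc == ".circleci/config.yml") = false := by simp [h]
    have h2 : (".circleci/config.yml" == lc) = false := by simp; exact fun e => h e.symm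
    rw [h1, h2]
    simp only [Bool.false_eq_true, if_false]
    split_ifs <;> decide

lemma look_g (lc : String) :
    (PySem.Dict.get? ciExactLookup lc == some "gitlab_ci") = (lc == ".gitlab-ci.yml") := by
  rw [lookup_char]
  by_cases h : lc = ".gitlab-ci.yml"
  · subst h; decide
  · have h1 : (lc == ".gitlab-ci.yml") = false := by simp [h]
    have h2 : (".gitlab-ci.yml" == lc) = false := by simp; exact fun e => h e.symm
    rw [h1, h2]
    simp only [Bool.false_eq_true, if_false]
    split_ifs <;> decide

lemma look_j (lc : String) :
    (PySem.Dict.get? ciExactLookup lc == some "jenkins") = (lc == "jenkinsfile") := by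
  rw [lookup_char]
  by_cases h : lc = "jenkinsfile"
  · subst h; decide
  · have h1 : (lc == "jenkinsfile") = false := by simp [h]
    have h2 : ("jenkinsfile" == lc) = false := by simp; exact fun e => h e.symm
    rw [h1, h2]
    simp only [Bool.false_eq_true, if_false]
    split_ifs <;> decide

lemma contains_foldB (contents : List String) (acc : PySem.Set String) (x : String) :
    PySem.Set.contains (contents.foldl ciStepB acc) x =
      (PySem.Set.contains acc x ||
        contents.any (fun c =>
          (x == "github_actions" && PySem.Str.startswith (PySem.Str.lower c) ".github/workflows/")
          || (PySem.Dict.get? ciExactLookup (PySem.Str.lower c) == some x))) := by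
  induction contents generalizing acc with
  | nil => simp
  | cons c cs ih =>
    simp only [List.foldl, List.any_cons, ih]
    simp only [ciStepB]
    cases hg : PySem.Dict.get? ciExactLookup (PySem.Str.lower c) <;>
      cases hs : PySem.Str.startswith (PySem.Str.lower c) ".github/workflows/" <;>
        simp only [Bool.false_eq_true, if_false, if_true, Bool.and_false, Bool.and_true,
          contains_add]
    all_goals try (apply bool_ext; simp)
    all_goals aesop


def condGha (contents : List String) : Bool :=
  contents.any (fun c => PySem.Str.startswith (PySem.Str.lower c) ".github/workflows/")

def ciNormal (contents : List String) : List String :=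
  (if condGha contents then ["github_actions"] else []) ++
  (if condEq contents ".travis.yml" then ["travis"] else []) ++
  (if condEq contents ".circleci/config.yml" then ["circleci"] else []) ++
  (if condEq contents ".gitlab-ci.yml" then ["gitlab_ci"] else []) ++
  (if condEq contents "jenkinsfile" then ["jenkins"] else [])

lemma condGha_def (contents : List String) :
    contents.any (fun c => PySem.Str.startswith (PySem.Str.lower c) ".github/workflows/") = condGha contents := rfl
lemma condEq_def (contents : List String) (p : String) :
    contents.any (fun c => PySem.Str.lower c == p) = condEq contents p := rfl

lemma lowFix1 : PySem.Str.lower ".github/workflows/" = ".github/workflows/" := by decide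
lemma lowFix2 : PySem.Str.lower ".travis.yml" = ".travis.yml" := by decide
lemma lowFix3 : PySem.Str.lower ".circleci/config.yml" = ".circleci/config.yml" := by decide
lemma lowFix4 : PySem.Str.lower ".gitlab-ci.yml" = ".gitlab-ci.yml" := by decide
lemma lowFix5 : PySem.Str.lower "Jenkinsfile" = "jenkinsfile" := by decide
lemma endsFix1 : PySem.Str.endswith ".github/workflows/" "/" = true := by decide
lemma endsFix2 : PySem.Str.endswith ".travis.yml" "/" = false := by decide
lemma endsFix3 : PySem.Str.endswith ".circleci/config.yml" "/" = false := by decide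
lemma endsFix4 : PySem.Str.endswith ".gitlab-ci.yml" "/" = false := by decide
lemma endsFix5 : PySem.Str.endswith "Jenkinsfile" "/" = false := by decide

lemma detectA_eq_normal (contents : List String) :
    detect_ci_systems_py contents = ciNormal contents := by
  simp only [detect_ci_systems_py, ciConfigPaths, List.foldl, ciInnerA,
    lowFix1, lowFix2, lowFix3, lowFix4, lowFix5,
    endsFix1, endsFix2, endsFix3, endsFix4, endsFix5,
    if_true, if_false, Bool.false_eq_true, contains_ofList_map,
    condGha_def, ciNormal]
  cases h1 : condGha contents <;>
    cases h2 : condEq contents ".travis.yml" <;>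
      cases h3 : condEq contents ".circleci/config.yml" <;>
        cases h4 : condEq contents ".gitlab-ci.yml" <;>
          cases h5 : condEq contents "jenkinsfile" <;>
            simp

lemma beqSelf : ("github_actions" == "github_actions") = true := by decide
lemma beqT : ("travis" == "github_actions") = false := by decide
lemma beqC : ("circleci" == "github_actions") = false := by decide
lemma beqG : ("gitlab_ci" == "github_actions") = false := by decide
lemma beqJ : ("jenkins" == "github_actions") = false := by decide

lemma detectB_eq_normal (contents : List String) :
    detect_ci_systems_py_alt contents = ciNormal contents := by
  have hmt : ∀ p : String, PySem.Set.contains (PySem.Set.empty : PySem.Set String) p = false :=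
    fun _ => rfl
  simp only [detect_ci_systems_py_alt, ciSystemOrder, List.filter_cons, List.filter_nil,
    contains_foldB, hmt, Bool.false_or, look_gha, look_t, look_c, look_g, look_j,
    beqSelf, beqT, beqC, beqG, beqJ, Bool.true_and, Bool.false_and, Bool.or_false, Bool.false_or,
    condGha_def, condEq_def, ciNormal]
  cases h1 : condGha contents <;>
    cases h2 : condEq contents ".travis.yml" <;>
      cases h3 : condEq contents ".circleci/config.yml" <;>
        cases h4 : condEq contents ".gitlab-ci.yml" <;>
          cases h5 : condEq contents "jenkinsfile" <;>
            simp

-- ===== VERDICT (by name: the statement is the Claim_ definition above) =====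
theorem detect_ci_systems_py_spec : Claim_equal_detect_ci_systems_py := by
  intro contents _
  unfold Spec_detect_ci_systems_py
  rw [detectA_eq_normal, detectB_eq_normal]
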